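-- pv_equiv track=rewrite | github.com/lobsterkatie/CodeFights | Arcade/LoopTunnel/apple_boxes.py | appleBoxes
-- ===== SOURCE A (Python) =====
-- def appleBoxes(k):
--     red_apples = yellow_apples = 0
--     for i in range(1, k+1):
--         if (i % 2) == 0:
--             red_apples += i ** 2
--         else:
--             yellow_apples += i ** 2
--
--     return red_apples - yellow_apples
-- ===== SOURCE B (Python) =====
-- def appleBoxes(k):
--     # Closed form: sum_{i=1..k} (-1)^i * i^2 = (-1)^k * k*(k+1)//2
--     if k <= 0:
--         return 0
--     t = (k * (k + 1)) // 2
--     return t if k % 2 == 0 else -t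
-- ===== Notes on version B (the rewrite author's own statement) =====
-- stated objective: faster
-- what changed: Replaces the O(k) loop over 1..k with the closed-form alternating-sum-of-squares formula (-1)^k * k*(k+1)//2.
import Mathlib
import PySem

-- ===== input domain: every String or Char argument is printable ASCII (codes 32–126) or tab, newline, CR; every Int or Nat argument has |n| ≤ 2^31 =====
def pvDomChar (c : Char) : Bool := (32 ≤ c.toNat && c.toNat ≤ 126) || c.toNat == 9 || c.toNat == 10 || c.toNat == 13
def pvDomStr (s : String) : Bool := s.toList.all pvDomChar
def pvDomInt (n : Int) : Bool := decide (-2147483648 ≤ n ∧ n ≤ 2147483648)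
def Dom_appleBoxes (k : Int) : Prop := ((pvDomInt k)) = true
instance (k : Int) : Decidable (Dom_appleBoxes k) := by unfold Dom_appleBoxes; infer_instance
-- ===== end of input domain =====

-- B replaces A's O(k) accumulation loop by the closed-form formula (-1)^k * k*(k+1)//2 (faster: asymptotic).

-- ===== PORT A =====
def appleBoxes (k : Int) : Int :=
  let st := (PySem.List.pyRange 1 (k + 1) 1).foldl
    (fun (st : Int × Int) i =>
      if PySem.Int.mod i 2 = 0 then (st.1 + i ^ 2, st.2) else (st.1, st.2 + i ^ 2))
    (0, 0)
  st.1 - st.2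

-- ===== PORT B =====
def appleBoxes_alt (k : Int) : Int :=
  if k ≤ 0 then 0
  else
    let t := PySem.Int.floordiv (k * (k + 1)) 2
    if PySem.Int.mod k 2 = 0 then t else -t

-- ===== PRECONDITION & SPEC =====
def Spec_appleBoxes (k : Int) (out : Int) : Prop := out = appleBoxes_alt k
instance (k : Int) (out : Int) : Decidable (Spec_appleBoxes k out) := by unfold Spec_appleBoxes; infer_instance

-- ===== CLAIM (what is proved, stated in full; the proofs are below) =====
def Claim_equal_appleBoxes : Prop := ∀ (k : Int), Dom_appleBoxes k → Spec_appleBoxes k (appleBoxes k)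

-- ===== LEMMAS AND PROOFS =====

-- A's loop as a function of the upper bound, for the induction.
def pvLoop (b : Int) : Int × Int :=
  (PySem.List.pyRange 1 b 1).foldl
    (fun (st : Int × Int) i =>
      if PySem.Int.mod i 2 = 0 then (st.1 + i ^ 2, st.2) else (st.1, st.2 + i ^ 2))
    (0, 0)

-- twice A's loop difference is the signed product n*(n+1)
lemma pvLoop_diff (n : Nat) :
    2 * ((pvLoop ((n : Int) + 1)).1 - (pvLoop ((n : Int) + 1)).2) =
      (if n % 2 = 0 then 1 else -1) * (n : Int) * ((n : Int) + 1) := by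
  induction n with
  | zero => decide
  | succ m ih =>
    have hsplit : PySem.List.pyRange 1 ((m : Int) + 1 + 1) 1 =
        PySem.List.pyRange 1 ((m : Int) + 1) 1 ++ [(m : Int) + 1] :=
      PySem.List.pyRange_one_succ_right (by omega)
    have hmod : PySem.Int.mod ((m : Int) + 1) 2 = (((m + 1) % 2 : Nat) : Int) := by
      have := PySem.Int.mod_natCast (m + 1) 2
      push_cast at this ⊢
      exact this
    unfold pvLoop at ih ⊢
    push_cast
    rw [hsplit, List.foldl_append]
    simp only [List.foldl, hmod]
    rcases Nat.even_or_odd m with hm | hm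
    · have h0 : m % 2 = 0 := Nat.even_iff.mp hm
      have h1 : (m + 1) % 2 = 1 := by omega
      rw [if_pos h0] at ih
      rw [h1, if_neg (by norm_num), if_neg (by omega)]
      push_cast
      linear_combination ih
    · have h0 : m % 2 = 1 := Nat.odd_iff.mp hm
      have h1 : (m + 1) % 2 = 0 := by omega
      rw [if_neg (by omega)] at ih
      rw [h1, if_pos (by norm_num), if_pos (by omega)]
      push_cast
      linear_combination ih

-- ===== VERDICT (by name: the statement is the Claim_ definition above) =====
theorem appleBoxes_spec : Claim_equal_appleBoxes := by
  intro k _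
  unfold Spec_appleBoxes appleBoxes_alt
  have hA : appleBoxes k = (pvLoop (k + 1)).1 - (pvLoop (k + 1)).2 := rfl
  rw [hA]
  by_cases hk : k ≤ 0
  · unfold pvLoop
    rw [PySem.List.pyRange_one_eq_nil (by omega)]
    simp [hk]
  · push Not at hk
    obtain ⟨n, rfl⟩ : ∃ n : Nat, k = (n : Int) + 1 := ⟨(k - 1).toNat, by omega⟩
    have hcast : ((n : Int) + 1) + 1 = ((n + 1 : Nat) : Int) + 1 := by push_cast; ring
    rw [hcast]
    have hd := pvLoop_diff (n + 1)
    set x := (pvLoop (((n + 1 : Nat) : Int) + 1)).1 - (pvLoop (((n + 1 : Nat) : Int) + 1)).2 with hx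
    have hmodk : PySem.Int.mod ((n : Int) + 1) 2 = (((n + 1) % 2 : Nat) : Int) := by
      have := PySem.Int.mod_natCast (n + 1) 2
      push_cast at this ⊢
      exact this
    rw [if_neg (by omega : ¬ ((n : Int) + 1 ≤ 0)), hmodk]
    set m := ((n : Int) + 1) * ((n : Int) + 1 + 1) with hm
    rw [show ((n : Int) + 1) * (((n + 1 : Nat) : Int) + 1) = m from by
      rw [hm]; push_cast; ring]
    have hfd : PySem.Int.floordiv m 2 = m / 2 :=
      PySem.Int.floordiv_eq_ediv_of_pos (by norm_num)
    push_cast at hd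
    rcases Nat.even_or_odd (n + 1) with hp | hp
    · have h0 : (n + 1) % 2 = 0 := Nat.even_iff.mp hp
      rw [if_pos h0] at hd
      rw [h0]
      rw [if_pos (by norm_num), hfd]
      have hd2 : 2 * x = m := by rw [hm]; linear_combination hd
      omega
    · have h0 : (n + 1) % 2 = 1 := Nat.odd_iff.mp hp
      rw [if_neg (by omega)] at hd
      rw [h0]
      rw [if_neg (by norm_num), hfd]
      have hd2 : 2 * x = -m := by rw [hm]; linear_combination hd
      omega
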